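-- pv_equiv track=rewrite | github.com/HungryM1NT/MTUCI_practice | main.py | get_CoordToCountVal_dict
-- ===== SOURCE A (Python) =====
-- def get_CoordToCountVal_dict(points):
--     coord_to_countval = dict()
--     for point in points:
--         if coord_to_countval.get((point[0], point[1])) == None:
--             coord_to_countval[((point[0], point[1]))] = [1, point[2]]
--         else:
--             coord_to_countval[((point[0], point[1]))][0] += 1
--     return coord_to_countval
-- ===== SOURCE B (Python) =====
-- def get_CoordToCountVal_dict(points):
--     counts = {}
--     for k in [(p[0], p[1]) for p in points]:
--         counts[k] = counts.get(k, 0) + 1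
--     result = {}
--     for p in points:
--         k = (p[0], p[1])
--         if k not in result:
--             result[k] = [counts[k], p[2]]
--     return result
-- ===== Notes on version B (the rewrite author's own statement) =====
-- stated objective: alternative
-- what changed: Replaces A's single fused pass (conditional insert-or-mutate of [count,val] cells) by two separated passes: first a full count table over the coordinate keys, then an assembly pass that sets [total_count, value] once per first-seen key.
import Mathlib
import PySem

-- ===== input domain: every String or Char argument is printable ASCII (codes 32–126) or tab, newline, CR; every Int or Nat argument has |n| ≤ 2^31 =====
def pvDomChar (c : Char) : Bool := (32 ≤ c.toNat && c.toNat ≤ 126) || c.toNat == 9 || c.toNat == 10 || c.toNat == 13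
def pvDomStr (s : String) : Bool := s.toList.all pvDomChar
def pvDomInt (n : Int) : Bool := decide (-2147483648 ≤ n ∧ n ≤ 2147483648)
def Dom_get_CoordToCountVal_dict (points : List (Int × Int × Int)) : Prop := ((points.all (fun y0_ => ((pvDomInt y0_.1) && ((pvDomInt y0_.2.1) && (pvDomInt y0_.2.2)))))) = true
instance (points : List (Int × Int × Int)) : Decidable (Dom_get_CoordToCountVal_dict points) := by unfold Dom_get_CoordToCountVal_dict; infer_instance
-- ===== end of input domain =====

-- B replaces A's single fused pass (insert-or-mutate [count,val] cells) by two separated passes: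
-- a full count table first, then an assembly pass setting [total_count, value] once per first-seen key
-- (alternative decomposition, same cost; equal return value, no side effects involved).

-- ===== PORT A =====
-- the in-place mutation cell[0] += 1 of A
def pvBump : List Int → List Int
  | [] => []
  | a :: t => (a + 1) :: t

-- one loop step of A: dict.get == None → new cell [1, z], else the cell's head is incremented in place
def pvStepA (d : PySem.Dict (Int × Int) (List Int)) (p : Int × Int × Int) :
    PySem.Dict (Int × Int) (List Int) :=
  match d.get? (p.1, p.2.1) with
  | none => d.insert (p.1, p.2.1) [1, p.2.2]
  | some v => d.insert (p.1, p.2.1) (pvBump v)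

def get_CoordToCountVal_dict (points : List (Int × Int × Int)) : List (Int × Int × List Int) :=
  ((points.foldl pvStepA PySem.Dict.empty).items).map (fun e => (e.1.1, e.1.2, e.2))

-- ===== PORT B =====
-- counts[k] = counts.get(k, 0) + 1
def pvCountStep (d : PySem.Dict (Int × Int) Int) (k : Int × Int) : PySem.Dict (Int × Int) Int :=
  d.insert k (d.getD k 0 + 1)

-- if k not in result: result[k] = [counts[k], p[2]]  (counts[k]: k is always present, so getD 0 is exact)
def pvStepB (c : PySem.Dict (Int × Int) Int) (r : PySem.Dict (Int × Int) (List Int))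
    (p : Int × Int × Int) : PySem.Dict (Int × Int) (List Int) :=
  if r.contains (p.1, p.2.1) then r
  else r.insert (p.1, p.2.1) [c.getD (p.1, p.2.1) 0, p.2.2]

def get_CoordToCountVal_dict_alt (points : List (Int × Int × Int)) : List (Int × Int × List Int) :=
  let counts := (points.map (fun p => (p.1, p.2.1))).foldl pvCountStep PySem.Dict.empty
  let result := points.foldl (pvStepB counts) PySem.Dict.empty
  result.items.map (fun e => (e.1.1, e.1.2, e.2))

-- ===== PRECONDITION & SPEC =====
def Spec_get_CoordToCountVal_dict (points : List (Int × Int × Int)) (out : List (Int × Int × List Int)) : Prop := out = get_CoordToCountVal_dict_alt points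
instance (points : List (Int × Int × Int)) (out : List (Int × Int × List Int)) : Decidable (Spec_get_CoordToCountVal_dict points out) := by unfold Spec_get_CoordToCountVal_dict; infer_instance

-- ===== CLAIM (what is proved, stated in full; the proofs are below) =====
def Claim_equal_get_CoordToCountVal_dict : Prop := ∀ (points : List (Int × Int × Int)), Dom_get_CoordToCountVal_dict points → Spec_get_CoordToCountVal_dict points (get_CoordToCountVal_dict points)

-- ===== LEMMAS AND PROOFS =====

def pvKey (p : Int × Int × Int) : Int × Int := (p.1, p.2.1)

-- bump the head of a [count, val] cell by n
def pvInc (n : Int) : List Int → List Int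
  | [] => []
  | a :: t => (a + n) :: t

-- the points of l whose key is new (not in seen, nor earlier in l): first occurrences
def pvFirstNew : List (Int × Int × Int) → List (Int × Int) → List (Int × Int × Int)
  | [], _ => []
  | p :: l, s => if pvKey p ∈ s then pvFirstNew l s else p :: pvFirstNew l (pvKey p :: s)

theorem pvInc_zero (v : List Int) : pvInc 0 v = v := by
  cases v <;> simp [pvInc]

theorem pvFirstNew_congr (l : List (Int × Int × Int)) (s₁ s₂ : List (Int × Int))
    (h : ∀ x, x ∈ s₁ ↔ x ∈ s₂) : pvFirstNew l s₁ = pvFirstNew l s₂ := by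
  induction l generalizing s₁ s₂ with
  | nil => rfl
  | cons p l ih =>
    simp only [pvFirstNew, h (pvKey p)]
    split
    · exact ih s₁ s₂ h
    · exact congrArg _ (ih _ _ (by intro x; simp [h x]))

theorem pvKey_not_mem_of_mem_firstNew (l : List (Int × Int × Int)) (s : List (Int × Int))
    (p : Int × Int × Int) (hp : p ∈ pvFirstNew l s) : pvKey p ∉ s := by
  induction l generalizing s with
  | nil => simp [pvFirstNew] at hp
  | cons q l ih =>
    simp only [pvFirstNew] at hp
    split at hp
    · exact ih s hp
    · rcases List.mem_cons.1 hp with rfl | hp'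
      · assumption
      · intro hmem
        exact ih _ hp' (List.mem_cons_of_mem _ hmem)

-- count of a key after prepending a point whose key differs
theorem pvCount_cons_ne (p : Int × Int × Int) (l : List (Int × Int × Int)) (x : Int × Int)
    (h : x ≠ pvKey p) : ((p :: l).map pvKey).count x = (l.map pvKey).count x := by
  rw [List.map_cons, List.count_cons]
  have hb : (x == pvKey p) = false := by simpa using h
  have hb2 : (pvKey p == x) = false := by simpa using Ne.symm h
  simp [hb2]

theorem pvCount_cons_self (p : Int × Int × Int) (l : List (Int × Int × Int)) :
    ((p :: l).map pvKey).count (pvKey p) = (l.map pvKey).count (pvKey p) + 1 := by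
  rw [List.map_cons, List.count_cons]
  simp

-- characterization of A's loop: old cells bumped by the key's count in l, new cells for first occurrences
theorem pvLemA (l : List (Int × Int × Int)) (r : PySem.Dict (Int × Int) (List Int))
    (hr : r.keys.Nodup) :
    (l.foldl pvStepA r).items =
      r.items.map (fun e => (e.1, pvInc ((l.map pvKey).count e.1 : Int) e.2))
        ++ (pvFirstNew l r.keys).map
            (fun p => (pvKey p, [((l.map pvKey).count (pvKey p) : Int), p.2.2])) := by
  induction l generalizing r with
  | nil =>
    simp [pvFirstNew, pvInc_zero]
  | cons p l ih =>
    have hfold : ((p :: l).foldl pvStepA r) = l.foldl pvStepA (pvStepA r p) := rfl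
    rw [hfold]
    by_cases hc : r.contains (p.1, p.2.1)
    · -- key already present: cell head += 1
      obtain ⟨v, hv⟩ : ∃ v, r.get? (p.1, p.2.1) = some v := by
        rcases h : r.get? (p.1, p.2.1) with _ | v
        · rw [PySem.Dict.get?_eq_none_iff_contains] at h; simp [h] at hc
        · exact ⟨v, rfl⟩
      have hstep : pvStepA r p = r.insert (p.1, p.2.1) (pvBump v) := by
        unfold pvStepA
        split <;> simp_all
      have hkeys : (pvStepA r p).keys = r.keys := by
        rw [hstep]; exact PySem.Dict.keys_insert_of_contains r _ hc
      rw [ih _ (hkeys ▸ hr)]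
      have hmemk : (p.1, p.2.1) ∈ r.keys := (PySem.Dict.contains_iff_mem_keys _ _).1 hc
      have hfn : pvFirstNew (p :: l) r.keys = pvFirstNew l r.keys := by
        simp [pvFirstNew, pvKey, hmemk]
      rw [hkeys, hfn]
      congr 1
      · -- old cells part
        rw [hstep, PySem.Dict.items_insert_of_contains r _ hc, List.map_map]
        apply List.map_congr_left
        intro e he
        simp only [Function.comp]
        by_cases hek : e.1 = (p.1, p.2.1)
        · have he' : (e.1, e.2) ∈ r.items := by rw [Prod.mk.eta]; exact he
          have h1 : r.get? e.1 = some e.2 := PySem.Dict.get?_of_mem_items r he' hr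
          have he2 : e.2 = v := by rw [hek, hv] at h1; exact (Option.some.inj h1).symm
          rw [if_pos (by simpa using hek), hek, he2]
          have hcount : ((p :: l).map pvKey).count (p.1, p.2.1)
              = (l.map pvKey).count (p.1, p.2.1) + 1 := pvCount_cons_self p l
          rw [hcount]
          cases v with
          | nil => simp [pvInc, pvBump]
          | cons a t => simp only [pvInc, pvBump]; push_cast; ring_nf
        · rw [if_neg (by simpa using hek), pvCount_cons_ne p l e.1 hek]
      · -- new cells part: counts of keys not in r.keys are unaffected by p
        apply List.map_congr_left
        intro q hq
        have hqk : pvKey q ∉ r.keys := pvKey_not_mem_of_mem_firstNew l r.keys q hq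
        have hne : pvKey q ≠ pvKey p := fun h => hqk (h ▸ hmemk)
        rw [pvCount_cons_ne p l (pvKey q) hne]
    · -- new key: fresh cell [1, z] appended
      have hnone : r.get? (p.1, p.2.1) = none := by
        rw [PySem.Dict.get?_eq_none_iff_contains]; simpa using hc
      have hstep : pvStepA r p = r.insert (p.1, p.2.1) [1, p.2.2] := by
        unfold pvStepA
        split <;> simp_all
      have hc' : r.contains (p.1, p.2.1) = false := by simpa using hc
      have hkeys : (pvStepA r p).keys = r.keys ++ [(p.1, p.2.1)] := by
        rw [hstep]; exact PySem.Dict.keys_insert_of_not_contains r _ hc'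
      have hmemk : (p.1, p.2.1) ∉ r.keys := fun h => hc ((PySem.Dict.contains_iff_mem_keys _ _).2 h)
      have hnd' : (pvStepA r p).keys.Nodup := by
        rw [hstep]; exact PySem.Dict.nodup_keys_insert r _ _ hr
      rw [ih _ hnd', hkeys]
      rw [pvFirstNew_congr l (r.keys ++ [(p.1, p.2.1)]) ((p.1, p.2.1) :: r.keys)
            (by intro x; simp [or_comm])]
      rw [hstep, PySem.Dict.items_insert_of_not_contains r _ hc', List.map_append]
      have hfn : pvFirstNew (p :: l) r.keys = p :: pvFirstNew l ((p.1, p.2.1) :: r.keys) := by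
        simp [pvFirstNew, pvKey, hmemk]
      rw [hfn]
      have hold : r.items.map (fun e => (e.1, pvInc ((l.map pvKey).count e.1 : Int) e.2)) =
          r.items.map (fun e => (e.1, pvInc (((p :: l).map pvKey).count e.1 : Int) e.2)) := by
        apply List.map_congr_left
        intro e he
        have hek : e.1 ≠ pvKey p := by
          intro h
          apply hmemk
          rw [show ((p.1, p.2.1) : Int × Int) = pvKey p from rfl, ← h]
          exact PySem.Dict.mem_keys_of_mem_items r he
        rw [pvCount_cons_ne p l e.1 hek]
      have hnewcell : ((p.1, p.2.1), pvInc ((l.map pvKey).count (p.1, p.2.1) : Int) [1, p.2.2])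
          = (pvKey p, [(((p :: l).map pvKey).count (pvKey p) : Int), p.2.2]) := by
        rw [pvCount_cons_self p l]
        show ((p.1, p.2.1), _) = ((p.1, p.2.1), _)
        congr 1
        show (1 + ((l.map pvKey).count (p.1, p.2.1) : Int)) :: [p.2.2] = _
        have : (((l.map pvKey).count (pvKey p) + 1 : Nat) : Int)
            = 1 + ((l.map pvKey).count (p.1, p.2.1) : Int) := by
          push_cast
          show ((l.map pvKey).count (p.1, p.2.1) : Int) + 1 = _
          ring
        rw [this]
      have htail : (pvFirstNew l ((p.1, p.2.1) :: r.keys)).map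
            (fun q => (pvKey q, [((l.map pvKey).count (pvKey q) : Int), q.2.2]))
          = (pvFirstNew l ((p.1, p.2.1) :: r.keys)).map
            (fun q => (pvKey q, [(((p :: l).map pvKey).count (pvKey q) : Int), q.2.2])) := by
        apply List.map_congr_left
        intro q hq
        have hqk : pvKey q ∉ ((p.1, p.2.1) :: r.keys) :=
          pvKey_not_mem_of_mem_firstNew l _ q hq
        have hne : pvKey q ≠ pvKey p := by
          intro h
          exact hqk (by rw [h]; exact List.mem_cons_self ..)
        rw [pvCount_cons_ne p l (pvKey q) hne]
      rw [hold]
      simp only [List.map_cons, List.map_nil]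
      rw [hnewcell, htail]
      simp [List.append_assoc]

-- characterization of B's assembly loop with a fixed count table c
theorem pvLemB (c : PySem.Dict (Int × Int) Int) (l : List (Int × Int × Int))
    (r : PySem.Dict (Int × Int) (List Int)) (hr : r.keys.Nodup) :
    (l.foldl (pvStepB c) r).items =
      r.items ++ (pvFirstNew l r.keys).map
          (fun p => (pvKey p, [c.getD (pvKey p) 0, p.2.2])) := by
  induction l generalizing r with
  | nil => simp [pvFirstNew]
  | cons p l ih =>
    have hfold : ((p :: l).foldl (pvStepB c) r) = l.foldl (pvStepB c) (pvStepB c r p) := rfl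
    rw [hfold]
    by_cases hc : r.contains (p.1, p.2.1)
    · have hstep : pvStepB c r p = r := by simp [pvStepB, hc]
      have hmemk : (p.1, p.2.1) ∈ r.keys := (PySem.Dict.contains_iff_mem_keys _ _).1 hc
      rw [hstep, ih r hr]
      simp [pvFirstNew, pvKey, hmemk]
    · have hc' : r.contains (p.1, p.2.1) = false := by simpa using hc
      have hstep : pvStepB c r p = r.insert (p.1, p.2.1) [c.getD (p.1, p.2.1) 0, p.2.2] := by
        simp [pvStepB, hc']
      have hkeys : (pvStepB c r p).keys = r.keys ++ [(p.1, p.2.1)] := by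
        rw [hstep]; exact PySem.Dict.keys_insert_of_not_contains r _ hc'
      have hmemk : (p.1, p.2.1) ∉ r.keys := fun h => hc ((PySem.Dict.contains_iff_mem_keys _ _).2 h)
      have hnd' : (pvStepB c r p).keys.Nodup := by
        rw [hstep]; exact PySem.Dict.nodup_keys_insert r _ _ hr
      rw [ih _ hnd', hkeys]
      rw [pvFirstNew_congr l (r.keys ++ [(p.1, p.2.1)]) ((p.1, p.2.1) :: r.keys)
            (by intro x; simp [or_comm])]
      rw [hstep, PySem.Dict.items_insert_of_not_contains r _ hc']
      simp [pvFirstNew, pvKey, hmemk]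

-- ===== VERDICT (by name: the statement is the Claim_ definition above) =====
theorem get_CoordToCountVal_dict_spec : Claim_equal_get_CoordToCountVal_dict := by
  intro points _
  show get_CoordToCountVal_dict points = get_CoordToCountVal_dict_alt points
  unfold get_CoordToCountVal_dict get_CoordToCountVal_dict_alt
  have hcounter : (points.map (fun p => (p.1, p.2.1))).foldl pvCountStep PySem.Dict.empty
      = PySem.Dict.counter (points.map pvKey) :=
    PySem.Dict.foldl_insert_getD_add_one_eq_counter (points.map pvKey)
  simp only [hcounter]
  congr 1
  rw [pvLemA points PySem.Dict.empty PySem.Dict.nodup_keys_empty,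
      pvLemB (PySem.Dict.counter (points.map pvKey)) points PySem.Dict.empty
        PySem.Dict.nodup_keys_empty]
  have hempty_items : (PySem.Dict.empty : PySem.Dict (Int × Int) (List Int)).items = [] := rfl
  have hempty_keys : (PySem.Dict.empty : PySem.Dict (Int × Int) (List Int)).keys = [] := rfl
  rw [hempty_items, hempty_keys]
  simp only [List.map_nil, List.nil_append]
  apply List.map_congr_left
  intro q _
  rw [PySem.Dict.getD_counter]
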